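-- pv_equiv track=rewrite | github.com/drhlxiao/stix-data-center-pipeline | stix/analysis/sci_packets_analyzer.py | get_spectrum_pixel_indexes
-- ===== SOURCE A (Python) =====
-- def get_spectrum_pixel_indexes(detector_mask, pixel_mask_array):
--     detectors = [0] * 32
--     pixel_mask = 0
--     for p in pixel_mask_array:
--         pixel_mask |= p
--     pixels = [0] * 12
--     for i in range(32):
--         if (detector_mask & (1 << i)) != 0:
--             detectors[i] = 1
--     for j in range(12):
--         if (pixel_mask & (1 << j)) != 0:
--             pixels[j] = 1
--
--     pixel_indexes = []
--     for i in range(32):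
--         for j in range(12):
--             if detectors[i] == 0 or pixels[j] == 0:
--                 continue
--             pixel_indexes.append(i * 12 + j)
--     return pixel_indexes
-- ===== SOURCE B (Python) =====
-- def _bit_positions(m):
--     # Ascending positions of the set bits of a nonnegative int, by recursively
--     # peeling the highest set bit (bit_length) and appending it after the rest.
--     if m <= 0:
--         return []
--     j = m.bit_length() - 1
--     return _bit_positions(m - (1 << j)) + [j]
--
--
-- def get_spectrum_pixel_indexes(detector_mask, pixel_mask_array):
--     pixel_mask = 0
--     for p in pixel_mask_array:
--         pixel_mask |= p
--     pix = _bit_positions(pixel_mask & 0xFFF)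
--     out = []
--     for i in _bit_positions(detector_mask & 0xFFFFFFFF):
--         base = 12 * i
--         out = out + [base + j for j in pix]
--     return out
-- ===== Notes on version B (the rewrite author's own statement) =====
-- stated objective: alternative
-- what changed: Replaces A's dense 0/1 detector/pixel bitmap arrays and fixed 32x12 range scans with skip by a recursive function that peels the highest set bit (via bit_length) off the masked detector word and the OR-combined pixel word, building each sparse index list back-to-front, then concatenates one block of pixel offsets per active detector.
import Mathlib
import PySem

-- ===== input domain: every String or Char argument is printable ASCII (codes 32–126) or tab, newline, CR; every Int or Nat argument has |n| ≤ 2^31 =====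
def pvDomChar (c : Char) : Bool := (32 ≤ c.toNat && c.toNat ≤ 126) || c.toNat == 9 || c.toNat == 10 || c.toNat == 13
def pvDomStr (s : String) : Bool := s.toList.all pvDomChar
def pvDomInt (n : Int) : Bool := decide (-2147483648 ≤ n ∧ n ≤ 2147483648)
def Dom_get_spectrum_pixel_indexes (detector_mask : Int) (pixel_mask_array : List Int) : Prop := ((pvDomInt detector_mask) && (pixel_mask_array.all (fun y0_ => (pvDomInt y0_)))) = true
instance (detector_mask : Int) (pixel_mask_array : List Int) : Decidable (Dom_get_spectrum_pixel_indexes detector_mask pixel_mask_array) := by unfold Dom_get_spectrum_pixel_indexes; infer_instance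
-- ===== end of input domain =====

-- B replaces A's dense 0/1 bitmap arrays and fixed 32x12 range scans by a recursive
-- highest-bit peeling (via bit_length) of the masked detector / OR-combined pixel words
-- (objective: alternative).

-- ===== PORT A =====
def get_spectrum_pixel_indexes (detector_mask : Int) (pixel_mask_array : List Int) : List Int :=
  let detectors : List Int := List.replicate 32 0
  let pixel_mask : Int := pixel_mask_array.foldl (fun pm p => PySem.Int.bor pm p) 0
  let pixels : List Int := List.replicate 12 0
  let detectors := (PySem.List.pyRange 0 32 1).foldl
    (fun d i => if PySem.Int.band detector_mask ((1 : Int) <<< i.toNat) != 0 then d.set i.toNat 1 else d)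
    detectors
  let pixels := (PySem.List.pyRange 0 12 1).foldl
    (fun pl j => if PySem.Int.band pixel_mask ((1 : Int) <<< j.toNat) != 0 then pl.set j.toNat 1 else pl)
    pixels
  (PySem.List.pyRange 0 32 1).foldl (fun acc i =>
    (PySem.List.pyRange 0 12 1).foldl (fun acc j =>
      if PySem.List.pyGetD detectors i 0 == 0 || PySem.List.pyGetD pixels j 0 == 0 then acc
      else acc ++ [i * 12 + j]) acc) []

-- ===== PORT B =====
-- Source B's _bit_positions: recursion on the value; the fuel argument only guards totality
-- (a masked word below 2^32 reaches 0 after at most 32 peels) and mirrors no Python code.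
def pvBitPositions (fuel : Nat) (m : Int) : List Int :=
  match fuel with
  | 0 => []
  | fuel + 1 =>
    if m ≤ 0 then []
    else
      let j : Nat := PySem.Int.bitLength m - 1   -- m.bit_length() - 1, m > 0 here
      pvBitPositions fuel (m - ((1 : Int) <<< j)) ++ [(j : Int)]

def get_spectrum_pixel_indexes_alt (detector_mask : Int) (pixel_mask_array : List Int) : List Int :=
  let pixel_mask : Int := pixel_mask_array.foldl (fun pm p => PySem.Int.bor pm p) 0
  let pix := pvBitPositions 13 (PySem.Int.band pixel_mask 4095)
  let det := pvBitPositions 33 (PySem.Int.band detector_mask 4294967295)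
  det.foldl (fun out i => out ++ pix.map (fun j => 12 * i + j)) []

-- ===== PRECONDITION & SPEC =====
def Spec_get_spectrum_pixel_indexes (detector_mask : Int) (pixel_mask_array : List Int) (out : List Int) : Prop := out = get_spectrum_pixel_indexes_alt detector_mask pixel_mask_array
instance (detector_mask : Int) (pixel_mask_array : List Int) (out : List Int) : Decidable (Spec_get_spectrum_pixel_indexes detector_mask pixel_mask_array out) := by unfold Spec_get_spectrum_pixel_indexes; infer_instance

-- ===== CLAIM (what is proved, stated in full; the proofs are below) =====
def Claim_equal_get_spectrum_pixel_indexes : Prop := ∀ (detector_mask : Int) (pixel_mask_array : List Int), Dom_get_spectrum_pixel_indexes detector_mask pixel_mask_array → Spec_get_spectrum_pixel_indexes detector_mask pixel_mask_array (get_spectrum_pixel_indexes detector_mask pixel_mask_array)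

-- ===== LEMMAS AND PROOFS =====

-- A's mark-loop, read pointwise: position k of the array built by `if c(i): arr[i] = 1`.
lemma getD_foldl_set (c : Int → Bool) :
    ∀ (L d : List Int) (k : Nat), k < d.length →
    (L.foldl (fun d i => if c i then d.set i.toNat 1 else d) d).getD k 0
      = if (L.any fun i => c i && i.toNat == k) then 1 else d.getD k 0 := by
  intro L
  induction L with
  | nil => intro d k hk; simp
  | cons i L ih =>
    intro d k hk
    simp only [List.foldl_cons, List.any_cons]
    rw [ih _ k (by by_cases h : c i <;> simp [h, hk])]
    by_cases hL : (L.any fun i => c i && i.toNat == k) = true <;>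
      by_cases hc : c i <;> by_cases hik : i.toNat = k <;>
        simp [hL, hc, hik, List.getD, hk]

lemma any_range_eq (c : Int → Bool) (n : Int) (k : Nat) (hk : (k : Int) < n) :
    ((PySem.List.pyRange 0 n 1).any fun i => c i && i.toNat == k) = c (k : Int) := by
  cases h : c (k : Int) with
  | true =>
    refine List.any_eq_true.mpr ⟨(k : Int), ?_, ?_⟩
    · exact (PySem.List.mem_pyRange_one).mpr ⟨by positivity, hk⟩
    · simp [h]
  | false =>
    refine List.any_eq_false.mpr ?_
    intro i hi
    obtain ⟨h0, _⟩ := (PySem.List.mem_pyRange_one).mp hi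
    by_cases hik : i.toNat = k
    · have : i = (k : Int) := by omega
      simp [this, h]
    · simp [hik]

-- the marked array reads back as the bit test, for any in-range index
lemma read_marked (c : Int → Bool) (n : Nat) (i : Int) (h0 : 0 ≤ i) (hn : i < (n : Int)) :
    PySem.List.pyGetD
      ((PySem.List.pyRange 0 (n : Int) 1).foldl
        (fun d j => if c j then d.set j.toNat 1 else d) (List.replicate n (0 : Int))) i 0
      = if c i then 1 else 0 := by
  have hlt : i.toNat < n := by omega
  rw [PySem.List.pyGetD_of_nonneg _ _ h0]
  have h := getD_foldl_set c (PySem.List.pyRange 0 (n : Int) 1) (List.replicate n (0 : Int))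
    i.toNat (by simpa using hlt)
  refine h.trans ?_
  rw [any_range_eq c _ _ (by omega)]
  have hi : ((i.toNat : Nat) : Int) = i := by omega
  rw [hi]
  by_cases hc : c i <;> simp [hc, hlt]

lemma flatMap_ite_nil {α β : Type} (L : List α) (c : α → Bool) (g : α → List β) :
    (L.flatMap fun i => if c i then g i else []) = (L.filter c).flatMap g := by
  induction L with
  | nil => rfl
  | cons i L ih => by_cases h : c i <;> simp [h, ih]

-- the generic shape of A: mark two bitmap arrays, nested scan-with-skip = filtered product
lemma nested_scan_eq (p q : Int → Bool) (n m : Nat) :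
    ((PySem.List.pyRange 0 (n : Int) 1).foldl (fun acc i =>
      (PySem.List.pyRange 0 (m : Int) 1).foldl (fun acc j =>
        if PySem.List.pyGetD
            ((PySem.List.pyRange 0 (n : Int) 1).foldl
              (fun d i' => if p i' then d.set i'.toNat 1 else d) (List.replicate n (0 : Int))) i 0 == 0
          || PySem.List.pyGetD
            ((PySem.List.pyRange 0 (m : Int) 1).foldl
              (fun d j' => if q j' then d.set j'.toNat 1 else d) (List.replicate m (0 : Int))) j 0 == 0
        then acc else acc ++ [i * 12 + j]) acc) ([] : List Int))
    = ((PySem.List.pyRange 0 (n : Int) 1).filter p).flatMap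
        (fun i => (((PySem.List.pyRange 0 (m : Int) 1).filter q).map (fun j => i * 12 + j))) := by
  rw [PySem.List.foldl_congr_mem _ _
    (fun acc i => (PySem.List.pyRange 0 (m : Int) 1).foldl
      (fun acc j => if p i && q j then acc ++ [i * 12 + j] else acc) acc) _ ?h]
  case h =>
    intro acc i hi
    obtain ⟨hi0, hin⟩ := (PySem.List.mem_pyRange_one).mp hi
    refine PySem.List.foldl_congr_mem _ _ _ _ ?_
    intro acc' j hj
    obtain ⟨hj0, hjm⟩ := (PySem.List.mem_pyRange_one).mp hj
    rw [read_marked p n i hi0 hin, read_marked q m j hj0 hjm]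
    by_cases hp : p i <;> by_cases hq : q j <;> simp [hp, hq]
  have step : ∀ (i : Int) (acc : List Int), (PySem.List.pyRange 0 (m : Int) 1).foldl
      (fun acc j => if p i && q j then acc ++ [i * 12 + j] else acc) acc
      = acc ++ (((PySem.List.pyRange 0 (m : Int) 1).filter
          (fun j => p i && q j)).map (fun j => i * 12 + j)) := by
    intro i acc
    exact PySem.List.foldl_append_if _ _ _ _
  simp only [step]
  rw [PySem.List.foldl_append_eq_flatMap, List.nil_append]
  have hif : ∀ i : Int,
      (((PySem.List.pyRange 0 (m : Int) 1).filter (fun j => p i && q j)).map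
        (fun j => i * 12 + j))
      = if p i then (((PySem.List.pyRange 0 (m : Int) 1).filter q).map (fun j => i * 12 + j))
        else [] := by
    intro i; by_cases h : p i <;> simp [h]
  simp only [hif]
  exact flatMap_ite_nil _ _ _

-- proof-only shorthand for A's per-bit test (delta-equal to the ports' lambdas)
def pvBitTest (a i : Int) : Bool := PySem.Int.band a ((1 : Int) <<< i.toNat) != 0

-- (1 : Int) <<< k is the k-th power of two
lemma one_shl_eq (k : Nat) : @HShiftLeft.hShiftLeft Int Nat Int Int.instHShiftLeftNat (1 : Int) k = ((2 ^ k : Nat) : Int) := by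
  rw [Int.shiftLeft_eq]; push_cast; ring

-- within an n-bit all-ones word, subtraction is bitwise complement
lemma testBit_allOnes_sub : ∀ (i n Y : Nat), i < n → Y < 2 ^ n →
    ((2 ^ n - 1) - Y).testBit i = !(Y.testBit i) := by
  intro i
  induction i with
  | zero =>
    intro n Y hin hY
    have h2 : 2 ^ n = 2 * 2 ^ (n - 1) := by
      rw [← pow_succ']; congr 1; omega
    simp only [Nat.testBit_zero]
    rcases Nat.mod_two_eq_zero_or_one Y with h | h <;> simp [h] <;> omega
  | succ i ih =>
    intro n Y hin hY
    have h2 : 2 ^ n = 2 * 2 ^ (n - 1) := by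
      rw [← pow_succ']; congr 1; omega
    rw [Nat.testBit_succ, Nat.testBit_succ]
    have hdiv : (2 ^ n - 1 - Y) / 2 = 2 ^ (n - 1) - 1 - Y / 2 := by omega
    rw [hdiv]
    exact ih (n - 1) (Y / 2) (by omega) (by omega)

-- masking with 2^n - 1 yields a Nat below 2^n whose bits are A's per-bit tests
lemma band_mask_spec (a : Int) (n : Nat) :
    ∃ X : Nat, PySem.Int.band a ((2 ^ n - 1 : Nat) : Int) = (X : Int) ∧ X < 2 ^ n ∧
      ∀ k, k < n → X.testBit k = pvBitTest a (k : Int) := by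
  have hpos : (0:Nat) < 2 ^ n := Nat.two_pow_pos n
  by_cases ha : 0 ≤ a
  · refine ⟨a.toNat &&& (2 ^ n - 1), ?_, ?_, ?_⟩
    · rw [PySem.Int.band_of_nonneg ha (by positivity), Int.toNat_natCast]
    · rw [Nat.and_two_pow_sub_one_eq_mod]; exact Nat.mod_lt _ hpos
    · intro k hk
      simp only [pvBitTest, Int.toNat_natCast]
      rw [Nat.and_two_pow_sub_one_eq_mod, Nat.testBit_mod_two_pow, one_shl_eq,
        PySem.Int.band_of_nonneg ha (by positivity), Int.toNat_natCast, Nat.and_two_pow]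
      cases h : a.toNat.testBit k <;> simp [hk]
  · have ha' : ¬ (0 ≤ a) := ha
    have hN : (0:Int) ≤ -a - 1 := by omega
    have hband : ∀ (b : Nat), PySem.Int.band a (b : Int) = ((b - (b &&& (-a - 1).toNat) : Nat) : Int) := by
      intro b
      simp [PySem.Int.band, ha', Int.natCast_nonneg b]
    refine ⟨(2 ^ n - 1) - ((2 ^ n - 1) &&& (-a - 1).toNat), by rw [hband], by
      have := Nat.and_le_left (n := 2 ^ n - 1) (m := (-a - 1).toNat)
      omega, ?_⟩
    intro k hk
    simp only [pvBitTest, Int.toNat_natCast]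
    rw [Nat.and_comm, Nat.and_two_pow_sub_one_eq_mod,
      testBit_allOnes_sub k n _ hk (Nat.mod_lt _ hpos), Nat.testBit_mod_two_pow,
      one_shl_eq, hband, Nat.two_pow_and]
    cases h : (-a - 1).toNat.testBit k <;> simp [hk]

-- filtering an ascending range whose predicate holds at j and nowhere above
lemma filter_range_high (c : Nat → Bool) (j : Nat) : ∀ (n : Nat), j < n → c j = true →
    (∀ i, j < i → c i = false) → (List.range n).filter c = (List.range j).filter c ++ [j] := by
  intro n
  induction n with
  | zero => omega
  | succ n ih =>
    intro hjn hcj hab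
    rcases Nat.lt_or_ge j n with h | h
    · rw [List.range_succ, List.filter_append, ih h hcj hab]
      simp [hab n h]
    · have hjn' : j = n := by omega
      subst hjn'
      rw [List.range_succ, List.filter_append]
      simp [hcj]

-- B's recursive highest-bit peeling lists the set bits of a Nat in ascending order
lemma pvBitPositions_spec : ∀ (fuel X n : Nat), X < 2 ^ n → n < fuel →
    pvBitPositions fuel (X : Int) =
      ((List.range n).filter (fun k => X.testBit k)).map (fun k : Nat => (k : Int)) := by
  intro fuel
  induction fuel with
  | zero => omega
  | succ fuel ih =>
    intro X n hXn hnf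
    by_cases hX : X = 0
    · subst hX; simp [pvBitPositions, Nat.zero_testBit]
    · have hXpos : 0 < X := Nat.pos_of_ne_zero hX
      have hne : ((X : Nat) : Int) ≠ 0 := by exact_mod_cast hX
      have habs : ((X : Nat) : Int).natAbs = X := Int.natAbs_natCast X
      have hstep : pvBitPositions (fuel + 1) ((X : Nat) : Int)
          = pvBitPositions fuel (((X : Nat) : Int)
              - (@HShiftLeft.hShiftLeft Int Nat Int Int.instHShiftLeftNat (1 : Int) (PySem.Int.bitLength ((X : Nat) : Int) - 1)))
            ++ [((PySem.Int.bitLength ((X : Nat) : Int) - 1 : Nat) : Int)] := by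
        simp only [pvBitPositions]
        rw [if_neg (by omega)]
      set L := PySem.Int.bitLength ((X : Nat) : Int) with hL
      have h1 : 2 ^ (L - 1) ≤ X := by
        have := PySem.Int.two_pow_bitLength_le ((X : Nat) : Int) hne
        rwa [habs] at this
      have h2 : X < 2 ^ L := by
        have := PySem.Int.lt_two_pow_bitLength ((X : Nat) : Int)
        rwa [habs] at this
      have hL1 : 1 ≤ L := by
        by_contra h
        have h0 : L = 0 := by omega
        rw [h0] at h2
        omega
      set j := L - 1 with hj
      have hXlt : X < 2 ^ (j + 1) := by
        have hjL : j + 1 = L := by omega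
        rwa [hjL]
      have hjn : j < n := by
        by_contra h
        have : 2 ^ n ≤ 2 ^ j := Nat.pow_le_pow_right (by norm_num) (by omega)
        omega
      have hX' : X - 2 ^ j < 2 ^ j := by
        have hp : 2 ^ (j + 1) = 2 * 2 ^ j := by rw [pow_succ]; ring
        omega
      have hm : ((X : Nat) : Int) - @HShiftLeft.hShiftLeft Int Nat Int Int.instHShiftLeftNat (1 : Int) j = ((X - 2 ^ j : Nat) : Int) := by
        rw [one_shl_eq]; push_cast [h1]; ring
      have hXd : X = 2 ^ j + (X - 2 ^ j) := by omega
      have hcj : X.testBit j = true := by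
        conv_lhs => rw [hXd]
        rw [Nat.testBit_two_pow_add_eq, Nat.testBit_eq_false_of_lt hX']
        rfl
      rw [hstep, hm, ih (X - 2 ^ j) j hX' (by omega)]
      rw [filter_range_high _ j n hjn hcj
        (fun i hji => Nat.testBit_eq_false_of_lt
          (lt_of_lt_of_le hXlt (Nat.pow_le_pow_right (by norm_num) (by omega))))]
      have hfc : List.filter (fun k => X.testBit k) (List.range j)
          = List.filter (fun k => (X - 2 ^ j).testBit k) (List.range j) := by
        apply List.filter_congr
        intro k hk
        have hkj : k < j := List.mem_range.mp hk
        conv_lhs => rw [hXd]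
        rw [Nat.testBit_two_pow_add_gt hkj]
      rw [hfc, List.map_append]
      simp

-- the two sparse representations coincide: peeled bits of the masked word
-- = the ascending range filtered by A's per-bit test
lemma bits_band (a : Int) (n fuel : Nat) (hf : n < fuel) :
    pvBitPositions fuel (PySem.Int.band a ((2 ^ n - 1 : Nat) : Int)) =
      (PySem.List.pyRange 0 (n : Int) 1).filter (pvBitTest a) := by
  obtain ⟨X, hXeq, hXlt, hXbit⟩ := band_mask_spec a n
  rw [hXeq, pvBitPositions_spec fuel X n hXlt hf]
  rw [PySem.List.pyRange_one]
  have hn : ((n : Int) - 0).toNat = n := by omega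
  rw [hn, List.filter_map]
  have hzero : (fun k : Nat => (0 : Int) + (k : Int)) = (fun k : Nat => (k : Int)) := by
    funext k; ring
  rw [hzero]
  congr 1
  apply List.filter_congr
  intro k hk
  have hkn : k < n := List.mem_range.mp hk
  exact hXbit k hkn

-- ===== VERDICT (by name: the statement is the Claim_ definition above) =====
set_option maxHeartbeats 1000000 in
theorem get_spectrum_pixel_indexes_spec : Claim_equal_get_spectrum_pixel_indexes := by
  intro dm pma _
  unfold Spec_get_spectrum_pixel_indexes
  have hA : get_spectrum_pixel_indexes dm pma
      = ((PySem.List.pyRange 0 ((32 : Nat) : Int) 1).filter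
          (pvBitTest dm)).flatMap
        (fun i => (((PySem.List.pyRange 0 ((12 : Nat) : Int) 1).filter
          (pvBitTest (pma.foldl (fun pm p => PySem.Int.bor pm p) 0))).map
            (fun j => i * 12 + j))) := by
    unfold get_spectrum_pixel_indexes
    exact nested_scan_eq (pvBitTest dm)
      (pvBitTest (pma.foldl (fun pm p => PySem.Int.bor pm p) 0)) 32 12
  have e32 : ((2 ^ 32 - 1 : Nat) : Int) = 4294967295 := by norm_num
  have e12 : ((2 ^ 12 - 1 : Nat) : Int) = 4095 := by norm_num
  have hdet : pvBitPositions 33 (PySem.Int.band dm 4294967295)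
      = (PySem.List.pyRange 0 ((32 : Nat) : Int) 1).filter (pvBitTest dm) := by
    rw [← e32]; exact bits_band dm 32 33 (by norm_num)
  have hpix : pvBitPositions 13
        (PySem.Int.band (pma.foldl (fun pm p => PySem.Int.bor pm p) 0) 4095)
      = (PySem.List.pyRange 0 ((12 : Nat) : Int) 1).filter
          (pvBitTest (pma.foldl (fun pm p => PySem.Int.bor pm p) 0)) := by
    rw [← e12]; exact bits_band _ 12 13 (by norm_num)
  have hB : get_spectrum_pixel_indexes_alt dm pma
      = ((PySem.List.pyRange 0 ((32 : Nat) : Int) 1).filter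
          (pvBitTest dm)).flatMap
        (fun i => (((PySem.List.pyRange 0 ((12 : Nat) : Int) 1).filter
          (pvBitTest (pma.foldl (fun pm p => PySem.Int.bor pm p) 0))).map
            (fun j => 12 * i + j))) := by
    show (pvBitPositions 33 (PySem.Int.band dm 4294967295)).foldl
        (fun out i => out ++ (pvBitPositions 13
          (PySem.Int.band (pma.foldl (fun pm p => PySem.Int.bor pm p) 0) 4095)).map
            (fun j => 12 * i + j)) [] = _
    rw [PySem.List.foldl_append_eq_flatMap, List.nil_append, hdet, hpix]
  rw [hA, hB]
  congr 1
  funext i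
  congr 1
  funext j
  ring
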